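-- pv_equiv track=rewrite | github.com/HongyiZhouCN/wandb2numpy | metaworld_50envs/metaworld_50envs.py | convert_task_id_ppo
-- ===== SOURCE A (Python) =====
-- def convert_task_id_ppo(input_str):
--     output_str = []
--     for i, char in enumerate(input_str):
--         if char.isupper():
--             if i != 0:
--                 output_str.append('-')
--             output_str.append(char.lower())
--         else:
--             output_str.append(char)
--     return 'ppo_metaworld:' + "".join(output_str) + "-v2"
-- ===== SOURCE B (Python) =====
-- def convert_task_id_ppo(input_str):
--     # split into camelCase words first, then join with '-' and lowercase once
--     words = []
--     for ch in input_str: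
--         if ch.isupper() or not words:
--             words.append(ch)
--         else:
--             words[-1] += ch
--     return 'ppo_metaworld:' + '-'.join(words).lower() + '-v2'
-- ===== Notes on version B (the rewrite author's own statement) =====
-- stated objective: idiomatic
-- what changed: B first splits the string into camelCase words (a new word starts at each uppercase char), then hyphen-joins the word list and lowercases the joined body once, instead of A's per-character accumulation of hyphens and individually lowercased chars guarded by an index test.
import Mathlib
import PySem

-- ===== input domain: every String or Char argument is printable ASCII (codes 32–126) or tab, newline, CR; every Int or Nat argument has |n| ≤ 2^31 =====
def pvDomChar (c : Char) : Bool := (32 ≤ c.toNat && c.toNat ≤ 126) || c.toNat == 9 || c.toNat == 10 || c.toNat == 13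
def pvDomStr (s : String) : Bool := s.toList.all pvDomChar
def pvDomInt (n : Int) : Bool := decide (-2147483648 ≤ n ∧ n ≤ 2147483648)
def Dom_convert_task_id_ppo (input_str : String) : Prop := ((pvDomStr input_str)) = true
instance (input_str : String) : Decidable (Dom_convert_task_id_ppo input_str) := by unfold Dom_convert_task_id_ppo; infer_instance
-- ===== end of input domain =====

-- B splits the input into camelCase words then hyphen-joins and lowercases once (idiomatic decomposition); same O(n) cost as A.


-- ===== PORT A =====
-- the for-loop over enumerate(input_str), accumulating output_str
def pvA_loop : List (Int × Char) → List Char → List Char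
  | [], out => out
  | (i, c) :: rest, out =>
    if PySem.Chars.isupper c then
      pvA_loop rest ((if i ≠ 0 then out ++ ['-'] else out) ++ [PySem.Chars.lowerChar c])
    else
      pvA_loop rest (out ++ [c])

def convert_task_id_ppo (input_str : String) : String :=
  String.mk ("ppo_metaworld:".toList ++ pvA_loop (PySem.List.enumerate input_str.toList 0) [] ++ "-v2".toList)

-- ===== PORT B =====
-- the for-loop over the chars, building the list of camelCase words
-- (words[-1] += ch: ws is nonempty in the else branch, so getLastD is exact)
def pvB_loop : List Char → List (List Char) → List (List Char)
  | [], ws => ws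
  | c :: rest, ws =>
    if PySem.Chars.isupper c || ws.isEmpty then
      pvB_loop rest (ws ++ [[c]])
    else
      pvB_loop rest (ws.dropLast ++ [ws.getLastD [] ++ [c]])

def convert_task_id_ppo_alt (input_str : String) : String :=
  String.mk ("ppo_metaworld:".toList
    ++ PySem.Chars.lower (PySem.Chars.join ['-'] (pvB_loop input_str.toList []))
    ++ "-v2".toList)

-- ===== PRECONDITION & SPEC =====
def Spec_convert_task_id_ppo (input_str : String) (out : String) : Prop := out = convert_task_id_ppo_alt input_str
instance (input_str : String) (out : String) : Decidable (Spec_convert_task_id_ppo input_str out) := by unfold Spec_convert_task_id_ppo; infer_instance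

-- ===== CLAIM (what is proved, stated in full; the proofs are below) =====
def Claim_equal_convert_task_id_ppo : Prop := ∀ (input_str : String), Dom_convert_task_id_ppo input_str → Spec_convert_task_id_ppo input_str (convert_task_id_ppo input_str)

-- ===== LEMMAS AND PROOFS =====

-- the body contributed by positions ≥ 1, as A computes it (dash + lowered char)
def pvTail : List Char → List Char
  | [] => []
  | c :: r => (if PySem.Chars.isupper c then ['-', PySem.Chars.lowerChar c] else [c]) ++ pvTail r

-- the body contributed by positions ≥ 1, as B computes it before the final lower()
def pvBody : List Char → List Char
  | [] => []
  | c :: r => (if PySem.Chars.isupper c then ['-'] else []) ++ c :: pvBody r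

theorem pv_lowerChar_id (c : Char) (h : ¬ PySem.Chars.isupper c) :
    PySem.Chars.lowerChar c = c := by
  simp [PySem.Chars.lowerChar, h]

theorem pv_lower_body (cs : List Char) :
    PySem.Chars.lower (pvBody cs) = pvTail cs := by
  induction cs with
  | nil => rfl
  | cons c r ih =>
    by_cases h : PySem.Chars.isupper c = true <;>
      simp [pvBody, pvTail, h, PySem.Chars.lower, pv_lowerChar_id,
        show PySem.Chars.isupper '-' = false from rfl] at ih ⊢ <;>
      simpa [PySem.Chars.lower, PySem.Chars.lowerChar, h] using ih

theorem pvA_loop_spec (cs : List Char) : ∀ (i : Int) (acc : List Char), 1 ≤ i →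
    pvA_loop (PySem.List.enumerate cs i) acc = acc ++ pvTail cs := by
  induction cs with
  | nil => intro i acc _; simp [PySem.List.enumerate_nil, pvA_loop, pvTail]
  | cons c r ih =>
    intro i acc hi
    rw [PySem.List.enumerate_cons]
    by_cases h : PySem.Chars.isupper c = true <;>
      simp [pvA_loop, h, show i ≠ 0 by omega, ih (i + 1) _ (by omega), pvTail]

theorem pv_join_concat (ys : List (List Char)) (x : List Char) (h : ys ≠ []) :
    PySem.Chars.join ['-'] (ys ++ [x]) = PySem.Chars.join ['-'] ys ++ '-' :: x := by
  induction ys with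
  | nil => exact absurd rfl h
  | cons p t ih =>
    cases t with
    | nil => simp [PySem.Chars.join_cons_cons, PySem.Chars.join_singleton]
    | cons q r =>
      have := ih (by simp)
      simp only [List.cons_append, PySem.Chars.join_cons_cons] at this ⊢
      simp [this]

theorem pvB_loop_spec (cs : List Char) : ∀ (ws : List (List Char)), ws ≠ [] →
    PySem.Chars.join ['-'] (pvB_loop cs ws) = PySem.Chars.join ['-'] ws ++ pvBody cs := by
  induction cs with
  | nil => intro ws _; simp [pvB_loop, pvBody]
  | cons c r ih =>
    intro ws hws
    by_cases h : PySem.Chars.isupper c = true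
    · rw [show pvB_loop (c :: r) ws = pvB_loop r (ws ++ [[c]]) by simp [pvB_loop, h]]
      rw [ih (ws ++ [[c]]) (by simp), pv_join_concat ws [c] hws]
      simp [pvBody, h]
    · obtain ⟨ys, x, rfl⟩ := ws.eq_nil_or_concat.resolve_left hws
      rw [List.concat_eq_append] at hws ⊢
      rw [show pvB_loop (c :: r) (ys ++ [x]) =
            pvB_loop r ((ys ++ [x]).dropLast ++ [(ys ++ [x]).getLastD [] ++ [c]]) by
          simp [pvB_loop, h]]
      rw [List.dropLast_concat, List.getLastD_concat]
      rw [ih (ys ++ [x ++ [c]]) (by simp)]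
      cases ys with
      | nil => simp [PySem.Chars.join_singleton, pvBody, h]
      | cons p t =>
        rw [pv_join_concat (p :: t) (x ++ [c]) (by simp),
            pv_join_concat (p :: t) x (by simp)]
        simp [pvBody, h]

theorem pv_core (cs : List Char) :
    pvA_loop (PySem.List.enumerate cs 0) [] =
      PySem.Chars.lower (PySem.Chars.join ['-'] (pvB_loop cs [])) := by
  cases cs with
  | nil => simp [PySem.List.enumerate_nil, pvA_loop, pvB_loop, PySem.Chars.join, PySem.Chars.lower, List.intercalate]
  | cons c r =>
    rw [PySem.List.enumerate_cons]
    have hb : pvB_loop (c :: r) [] = pvB_loop r [[c]] := by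
      by_cases h : PySem.Chars.isupper c = true <;> simp [pvB_loop, h]
    rw [hb, pvB_loop_spec r [[c]] (by simp), PySem.Chars.join_singleton]
    by_cases h : PySem.Chars.isupper c = true <;>
      simp [pvA_loop, h, pvA_loop_spec r 1 _ (by omega), PySem.Chars.lower,
        pv_lowerChar_id, ← pv_lower_body r, PySem.Chars.lower]

-- ===== VERDICT (by name: the statement is the Claim_ definition above) =====
theorem convert_task_id_ppo_spec : Claim_equal_convert_task_id_ppo := by
  intro input_str _
  unfold Spec_convert_task_id_ppo convert_task_id_ppo convert_task_id_ppo_alt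
  rw [pv_core]
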